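-- pv_equiv track=rewrite | github.com/tiepvupsu/zalo_voice | split.py | shift_nested_ids
-- ===== SOURCE A (Python) =====
-- def shift_nested_ids(nested_ids, groups, offset = 0):
--     """
--     move nested_ids[group] for group in groups to start at offset
--     INPUT:
--         nested_ids: [[[0], [1, 2]], [[3, 4], [5, 6]], [7]]
--         groups: [0, 2]
--         offset: 0
--     OUTPUT:
--         res = [[[0], [1, 2]], [4]]
--                                7
--     """
--     def helper(nested_id, offset):
--         res = []
--         for voice in nested_id:
--             res.append([offset + i for i in range(len(voice))])
--             offset += len(voice)
--         return res, offset
--     res = []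
--     for group in groups:
--         tmp, offset = helper(nested_ids[group], offset)
--         res.append(tmp)
--         # offset = res[-1][-1]+1
--         # res.append(_res)
--     return res
-- ===== SOURCE B (Python) =====
-- def shift_nested_ids(nested_ids, groups, offset = 0):
--     """Staged relabelling: (1) extract the shape (row lengths) of the selected
--     groups, (2) prefix-sum the flattened lengths into start ids, (3) rebuild
--     each row as a contiguous range from its start."""
--     shapes = [[len(voice) for voice in nested_ids[g]] for g in groups]
--     flat = [L for shape in shapes for L in shape]
--     starts = []
--     s = offset
--     for L in flat:
--         starts.append(s)
--         s += L
--     it = iter(starts)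
--     return [[list(range(st, st + L)) for L, st in zip(shape, it)] for shape in shapes]
-- ===== Notes on version B (the rewrite author's own statement) =====
-- stated objective: alternative
-- what changed: Replaced A's single pass that threads a running offset through a helper (emitting offset+i per element) by three staged passes: extract the row-length shapes of the selected groups, prefix-sum the flattened lengths into per-row start ids, then rebuild every row as list(range(start, start+len)).
import Mathlib
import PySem

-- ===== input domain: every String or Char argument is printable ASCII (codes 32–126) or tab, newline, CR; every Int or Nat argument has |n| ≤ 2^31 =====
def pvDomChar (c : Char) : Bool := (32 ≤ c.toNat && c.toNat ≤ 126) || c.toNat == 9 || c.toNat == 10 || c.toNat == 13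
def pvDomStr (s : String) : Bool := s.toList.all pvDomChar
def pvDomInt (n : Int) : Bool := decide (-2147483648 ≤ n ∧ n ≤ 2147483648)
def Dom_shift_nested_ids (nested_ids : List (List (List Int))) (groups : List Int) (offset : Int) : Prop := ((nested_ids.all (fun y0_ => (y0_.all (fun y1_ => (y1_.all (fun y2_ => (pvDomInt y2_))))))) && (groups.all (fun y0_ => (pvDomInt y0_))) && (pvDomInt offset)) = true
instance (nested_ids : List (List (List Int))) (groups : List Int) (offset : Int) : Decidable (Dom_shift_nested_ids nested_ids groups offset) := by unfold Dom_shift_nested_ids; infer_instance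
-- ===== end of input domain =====

-- B replaces A's offset-threading single pass by staged passes: shapes, prefix-summed starts, ranges (return value only, no mutation).

-- ===== PORT A =====
-- helper(nested_id, offset): for voice in nested_id: append [offset + i for i in range(len(voice))]; offset += len(voice)
def pvHelperA (nested_id : List (List Int)) (offset : Int) : List (List Int) × Int :=
  nested_id.foldl
    (fun st voice =>
      (st.1 ++ [(PySem.List.pyRange 0 (voice.length : Int) 1).map (fun i => st.2 + i)],
       st.2 + (voice.length : Int)))
    ([], offset)

def shift_nested_ids (nested_ids : List (List (List Int))) (groups : List Int) (offset : Int) : List (List (List Int)) :=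
  (groups.foldl
    (fun (st : List (List (List Int)) × Int) group =>
      let p := pvHelperA (PySem.List.pyGetD nested_ids group []) st.2
      (st.1 ++ [p.1], p.2))
    ([], offset)).1

-- ===== PORT B =====
-- [[list(range(st, st + L)) for L, st in zip(shape, it)] for shape in shapes]:
-- each shape consumes exactly shape.length starts from the shared iterator
def pvRebuild : List (List Int) → List Int → List (List (List Int))
  | [], _ => []
  | shape :: rest, starts =>
      (List.zipWith (fun L st => PySem.List.pyRange st (st + L) 1) shape starts) ::
        pvRebuild rest (starts.drop shape.length)

def shift_nested_ids_alt (nested_ids : List (List (List Int))) (groups : List Int) (offset : Int) : List (List (List Int)) :=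
  -- shapes = [[len(voice) for voice in nested_ids[g]] for g in groups]
  let shapes := groups.map (fun g => (PySem.List.pyGetD nested_ids g []).map (fun voice => (voice.length : Int)))
  -- flat = [L for shape in shapes for L in shape]
  let flat := shapes.flatMap id
  -- starts = []; s = offset; for L in flat: starts.append(s); s += L
  let starts := (flat.foldl (fun (st : List Int × Int) L => (st.1 ++ [st.2], st.2 + L)) ([], offset)).1
  pvRebuild shapes starts

-- ===== PRECONDITION & SPEC =====
-- Pre_ excludes exactly the inputs where nested_ids[group] raises IndexError in both Pythons.
def Pre_shift_nested_ids (nested_ids : List (List (List Int))) (groups : List Int) (offset : Int) : Prop :=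
  ∀ g ∈ groups, PySem.Raise.InRange nested_ids.length g
instance (nested_ids : List (List (List Int))) (groups : List Int) (offset : Int) : Decidable (Pre_shift_nested_ids nested_ids groups offset) := by unfold Pre_shift_nested_ids; infer_instance

def pvWitness_shift_nested_ids : List (List (List Int)) × List Int × Int :=
  ([[[0], [1, 2]], [[3, 4], [5, 6]], [[7]]], [0, 2], 0)

def Spec_shift_nested_ids (nested_ids : List (List (List Int))) (groups : List Int) (offset : Int) (out : List (List (List Int))) : Prop := out = shift_nested_ids_alt nested_ids groups offset
instance (nested_ids : List (List (List Int))) (groups : List Int) (offset : Int) (out : List (List (List Int))) : Decidable (Spec_shift_nested_ids nested_ids groups offset out) := by unfold Spec_shift_nested_ids; infer_instance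

-- ===== CLAIM (what is proved, stated in full; the proofs are below) =====
def Claim_equal_shift_nested_ids : Prop := ∀ (nested_ids : List (List (List Int))) (groups : List Int) (offset : Int), Dom_shift_nested_ids nested_ids groups offset → Pre_shift_nested_ids nested_ids groups offset → Spec_shift_nested_ids nested_ids groups offset (shift_nested_ids nested_ids groups offset)

-- ===== LEMMAS AND PROOFS =====

-- proof-only common form: the sequential pull both programs compute
def pvPullRow : List Int → Int → List Int × Int
  | [], n => ([], n)
  | _ :: t, n =>
      let p := pvPullRow t (n + 1)
      (n :: p.1, p.2)

def pvPullGroup : List (List Int) → Int → List (List Int) × Int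
  | [], n => ([], n)
  | v :: vs, n =>
      let r := pvPullRow v n
      let q := pvPullGroup vs r.2
      (r.1 :: q.1, q.2)

def pvPullGroups (nested_ids : List (List (List Int))) : List Int → Int → List (List (List Int)) × Int
  | [], n => ([], n)
  | g :: gs, n =>
      let p := pvPullGroup (PySem.List.pyGetD nested_ids g []) n
      let q := pvPullGroups nested_ids gs p.2
      (p.1 :: q.1, q.2)

-- proof-only closed form of B's starts accumulation
def pvStartsOf : List Int → Int → List Int
  | [], _ => []
  | L :: t, n => n :: pvStartsOf t (n + L)

lemma pvPullRow_range (voice : List Int) (n : Int) :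
    pvPullRow voice n =
      ((List.range voice.length).map (fun k => n + Int.ofNat k), n + (voice.length : Int)) := by
  induction voice generalizing n with
  | nil => simp [pvPullRow]
  | cons x t ih =>
      simp only [pvPullRow, ih (n + 1), List.length_cons, List.range_succ_eq_map,
        List.map_cons, List.map_map]
      refine Prod.ext ?_ (by push_cast; ring)
      simp only [List.cons.injEq]
      constructor
      · simp
      · apply List.map_congr_left
        intro a _
        simp only [Function.comp, Nat.succ_eq_add_one, Int.ofNat_eq_natCast]
        push_cast
        ring

lemma pvRow_pyRange (m : Int) (L : Nat) :
    (PySem.List.pyRange 0 (L : Int) 1).map (fun i => m + i)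
      = (List.range L).map (fun k => m + Int.ofNat k) := by
  rw [PySem.List.pyRange_one]
  have h : ((L : Int) - 0).toNat = L := by omega
  rw [h, List.map_map]
  apply List.map_congr_left
  intro a _
  simp [Function.comp]

-- B's range(st, st + len) is A's per-row comprehension
lemma pvRange_eq_pullRow (voice : List Int) (n : Int) :
    PySem.List.pyRange n (n + (voice.length : Int)) 1 = (pvPullRow voice n).1 := by
  rw [pvPullRow_range, PySem.List.pyRange_one]
  have h : (n + (voice.length : Int) - n).toNat = voice.length := by omega
  rw [h]
  apply List.map_congr_left
  intro a _
  simp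

-- ---- A equals the common pull ----
lemma pvHelperA_foldl (nid : List (List Int)) (n : Int) (acc : List (List Int)) :
    nid.foldl
      (fun st voice =>
        (st.1 ++ [(PySem.List.pyRange 0 (voice.length : Int) 1).map (fun i => st.2 + i)],
         st.2 + (voice.length : Int)))
      (acc, n)
    = (acc ++ (pvPullGroup nid n).1, (pvPullGroup nid n).2) := by
  induction nid generalizing n acc with
  | nil => simp [pvPullGroup]
  | cons v vs ih =>
      simp only [List.foldl_cons, pvPullGroup, pvPullRow_range]
      rw [ih]
      simp [pvRow_pyRange]

lemma pvHelperA_eq (nid : List (List Int)) (n : Int) :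
    pvHelperA nid n = pvPullGroup nid n := by
  unfold pvHelperA
  rw [pvHelperA_foldl]
  simp

lemma pvOuter_eq (nested_ids : List (List (List Int))) (gs : List Int) (n : Int)
    (acc : List (List (List Int))) :
    gs.foldl
      (fun (st : List (List (List Int)) × Int) group =>
        let p := pvHelperA (PySem.List.pyGetD nested_ids group []) st.2
        (st.1 ++ [p.1], p.2))
      (acc, n)
    = (acc ++ (pvPullGroups nested_ids gs n).1, (pvPullGroups nested_ids gs n).2) := by
  induction gs generalizing n acc with
  | nil => simp [pvPullGroups]
  | cons g gs ih =>
      rw [List.foldl_cons]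
      dsimp only
      rw [pvHelperA_eq, ih]
      simp [pvPullGroups]

-- ---- B equals the common pull ----
lemma pvStarts_foldl (flat : List Int) (n : Int) (acc : List Int) :
    flat.foldl (fun (st : List Int × Int) L => (st.1 ++ [st.2], st.2 + L)) (acc, n)
      = (acc ++ pvStartsOf flat n, n + flat.sum) := by
  induction flat generalizing n acc with
  | nil => simp [pvStartsOf]
  | cons L t ih =>
      simp only [List.foldl_cons, ih, pvStartsOf]
      refine Prod.ext (by simp) (by simp; ring)

lemma pvStartsOf_append (a b : List Int) (n : Int) :
    pvStartsOf (a ++ b) n = pvStartsOf a n ++ pvStartsOf b (n + a.sum) := by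
  induction a generalizing n with
  | nil => simp [pvStartsOf]
  | cons L t ih => simp [pvStartsOf, ih, add_assoc]

lemma pvStartsOf_length (a : List Int) (n : Int) : (pvStartsOf a n).length = a.length := by
  induction a generalizing n with
  | nil => rfl
  | cons L t ih => simp [pvStartsOf, ih]

lemma pvPullGroup_snd (nid : List (List Int)) (n : Int) :
    (pvPullGroup nid n).2 = n + (nid.map (fun v => (v.length : Int))).sum := by
  induction nid generalizing n with
  | nil => simp [pvPullGroup]
  | cons v vs ih =>
      simp [pvPullGroup, ih, pvPullRow_range]
      ring

lemma pvZip_startsOf (nid : List (List Int)) (rest : List Int) (n : Int) :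
    List.zipWith (fun L st => PySem.List.pyRange st (st + L) 1)
        (nid.map (fun v => (v.length : Int)))
        (pvStartsOf ((nid.map (fun v => (v.length : Int))) ++ rest) n)
      = (pvPullGroup nid n).1 := by
  induction nid generalizing n with
  | nil => simp [pvPullGroup]
  | cons v vs ih =>
      simp only [List.map_cons, List.cons_append, pvStartsOf, List.zipWith_cons_cons]
      rw [pvRange_eq_pullRow, ih]
      have h2 : (pvPullRow v n).2 = n + (v.length : Int) := by rw [pvPullRow_range]
      simp [pvPullGroup, h2]

lemma pvRebuild_eq (nested_ids : List (List (List Int))) (gs : List Int) (n : Int) :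
    pvRebuild (gs.map (fun g => (PySem.List.pyGetD nested_ids g []).map (fun v => (v.length : Int))))
        (pvStartsOf ((gs.map (fun g => (PySem.List.pyGetD nested_ids g []).map (fun v => (v.length : Int)))).flatMap id) n)
      = (pvPullGroups nested_ids gs n).1 := by
  induction gs generalizing n with
  | nil => simp [pvRebuild, pvPullGroups]
  | cons g tl ih =>
      simp only [List.map_cons, List.flatMap_cons, id]
      rw [pvStartsOf_append]
      simp only [pvRebuild]
      rw [List.drop_append_of_le_length (by simp [pvStartsOf_length])]
      have hdrop : (pvStartsOf ((PySem.List.pyGetD nested_ids g []).map (fun v => (v.length : Int))) n).drop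
            ((PySem.List.pyGetD nested_ids g []).map (fun v => (v.length : Int))).length = [] := by
        apply List.drop_of_length_le
        simp [pvStartsOf_length]
      rw [hdrop, List.nil_append]
      -- zipWith stops at the shorter list: split the appended starts off
      have hsplit : ∀ (a : List Int) (x y : List Int), a.length = x.length →
          List.zipWith (fun L st => PySem.List.pyRange st (st + L) 1) a (x ++ y)
            = List.zipWith (fun L st => PySem.List.pyRange st (st + L) 1) a x := by
        intro a x y h
        calc List.zipWith (fun L st => PySem.List.pyRange st (st + L) 1) a (x ++ y)
            = List.zipWith (fun L st => PySem.List.pyRange st (st + L) 1) (a ++ []) (x ++ y) := by simp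
          _ = _ := by rw [List.zipWith_append (h := h)]; simp
      rw [hsplit _ _ _ (by simp [pvStartsOf_length])]
      have hzip := pvZip_startsOf (PySem.List.pyGetD nested_ids g []) [] n
      simp only [List.append_nil] at hzip
      rw [hzip, ih]
      simp [pvPullGroups, pvPullGroup_snd]

theorem shift_nested_ids_spec : Claim_equal_shift_nested_ids := by
  intro nested_ids groups offset _ _
  show _ = _
  unfold shift_nested_ids shift_nested_ids_alt
  rw [pvOuter_eq]
  simp only [List.nil_append]
  rw [pvStarts_foldl]
  simp only [List.nil_append]
  rw [pvRebuild_eq]
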